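-- pv_equiv track=rewrite | github.com/skaranjit/153 | Program/program11.py | findEvenDigits
-- ===== SOURCE A (Python) =====
-- def findEvenDigits(lowBound,highBound):
--     """
--     Pre-Condition: lowBound and highBound needs to be a integer.LowBound needs to be lower integer than highBound
--     Post-Condition: None
--     Description: Returns a list of numbers whose each digit is even.
--     """
--     result = []
--     try:
--         lowBound = int(lowBound)
--         highBound = int(highBound)
--     except:
--         return "Error, parameters needs to be a number"
--     for ct in range(lowBound,highBound+1,1):
--         ct = str(ct)
--         flag = 0
--         for digit in ct:
--             if int(digit)%2 == 0:
--                 flag += 1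
--         if flag >= len(ct):
--             result.append(int(ct))
--         ct = int(ct)
--         ct+=1
--     return result
-- ===== SOURCE B (Python) =====
-- def findEvenDigits(lowBound, highBound):
--     # Enumerate numbers built only from even digits (BFS by digit length,
--     # ascending) instead of scanning the whole range.
--     result = [0] if lowBound <= 0 <= highBound else []
--     level = [2, 4, 6, 8]
--     for _ in range(len(str(highBound)) if highBound > 0 else 0):
--         result += [n for n in level if lowBound <= n <= highBound]
--         level = [10 * n + d for n in level if 10 * n <= highBound
--                  for d in (0, 2, 4, 6, 8)]
--     return result
-- ===== Notes on version B (the rewrite author's own statement) =====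
-- stated objective: faster
-- what changed: Instead of scanning every integer in [lowBound, highBound] and testing its decimal digits, B directly generates the numbers whose digits are all even, level by digit length over the alphabet {0,2,4,6,8}, in ascending order.
import Mathlib
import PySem

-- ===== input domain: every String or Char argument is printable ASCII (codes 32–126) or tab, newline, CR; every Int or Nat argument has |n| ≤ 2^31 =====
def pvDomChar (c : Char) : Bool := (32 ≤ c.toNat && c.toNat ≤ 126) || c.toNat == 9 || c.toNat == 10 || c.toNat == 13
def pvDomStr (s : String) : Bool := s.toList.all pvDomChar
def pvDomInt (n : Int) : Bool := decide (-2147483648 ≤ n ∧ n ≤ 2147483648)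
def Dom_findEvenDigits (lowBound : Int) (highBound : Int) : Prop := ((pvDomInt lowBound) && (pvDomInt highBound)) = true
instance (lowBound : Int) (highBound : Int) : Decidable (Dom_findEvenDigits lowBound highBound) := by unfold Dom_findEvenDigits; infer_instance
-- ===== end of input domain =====

-- B enumerates the even-digit numbers directly (level by digit length, over the alphabet
-- {0,2,4,6,8}, ascending) instead of scanning every integer of the range, intended to be
-- faster on large ranges.

-- ===== PORT A =====
def findEvenDigits (lowBound : Int) (highBound : Int) : List Int :=
  (PySem.List.pyRange lowBound (highBound + 1) 1).foldl (fun result ct =>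
    let s := PySem.Int.toStr ct
    let flag : Int := s.toList.foldl (fun flag digit =>
      if PySem.Int.mod ((PySem.Int.ofStr? (String.ofList [digit])).getD 0) 2 = 0
      then flag + 1 else flag) 0
    if flag ≥ (s.toList.length : Int) then result ++ [ct] else result) []

-- ===== PORT B =====
-- '[10*n+d for n in level if 10*n <= highBound for d in (0,2,4,6,8)]'
def fedNext (highBound : Int) (level : List Int) : List Int :=
  level.flatMap (fun n =>
    if 10 * n ≤ highBound then [10 * n, 10 * n + 2, 10 * n + 4, 10 * n + 6, 10 * n + 8] else [])

def findEvenDigits_alt (lowBound : Int) (highBound : Int) : List Int :=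
  let result0 : List Int := if lowBound ≤ 0 ∧ 0 ≤ highBound then [0] else []
  let k : Nat := if 0 < highBound then (PySem.Int.toStr highBound).toList.length else 0
  ((List.range k).foldl (fun (st : List Int × List Int) _ =>
      (st.1 ++ st.2.filter (fun n => decide (lowBound ≤ n ∧ n ≤ highBound)),
       fedNext highBound st.2))
    (result0, [2, 4, 6, 8])).1

-- ===== PRECONDITION & SPEC =====
-- A raises ValueError whenever the scanned range contains a negative number
-- (it calls int('-') on the sign character of str(ct)); Pre_ admits exactly the inputs where A returns.
def Pre_findEvenDigits (lowBound : Int) (highBound : Int) : Prop :=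
  0 ≤ lowBound ∨ highBound < lowBound
instance (lowBound : Int) (highBound : Int) : Decidable (Pre_findEvenDigits lowBound highBound) := by
  unfold Pre_findEvenDigits; infer_instance
def pvWitness_findEvenDigits : Int × Int := (0, 8)

def Spec_findEvenDigits (lowBound : Int) (highBound : Int) (out : List Int) : Prop :=
  out = findEvenDigits_alt lowBound highBound
instance (lowBound : Int) (highBound : Int) (out : List Int) : Decidable (Spec_findEvenDigits lowBound highBound out) := by
  unfold Spec_findEvenDigits; infer_instance

-- ===== CLAIM (what is proved, stated in full; the proofs are below) =====
def Claim_equal_findEvenDigits : Prop := ∀ (lowBound : Int) (highBound : Int), Dom_findEvenDigits lowBound highBound → Pre_findEvenDigits lowBound highBound → Spec_findEvenDigits lowBound highBound (findEvenDigits lowBound highBound)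

-- ===== LEMMAS AND PROOFS =====

-- 'every decimal digit of n is even', by numeric recursion
def allEvenNat (n : Nat) : Bool :=
  (n % 2 == 0) && (if _h : n < 10 then true else allEvenNat (n / 10))
decreasing_by exact Nat.div_lt_self (by omega) (by omega)

def allEvenInt (n : Int) : Bool := allEvenNat n.toNat

def numDigits (n : Nat) : Nat :=
  if _h : n < 10 then 1 else numDigits (n / 10) + 1
decreasing_by exact Nat.div_lt_self (by omega) (by omega)

lemma numDigits_pos (n : Nat) : 1 ≤ numDigits n := by
  rw [numDigits]; split
  · exact le_refl 1
  · omega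

lemma numDigits_mono {m n : Nat} (h : m ≤ n) : numDigits m ≤ numDigits n := by
  induction m using Nat.strong_induction_on generalizing n with
  | _ m ih =>
    by_cases hm : m < 10
    · have em : numDigits m = 1 := by rw [numDigits]; simp [hm]
      rw [em]; exact numDigits_pos n
    · have hn : ¬ n < 10 := by omega
      have em : numDigits m = numDigits (m / 10) + 1 := by rw [numDigits]; simp [hm]
      have en : numDigits n = numDigits (n / 10) + 1 := by rw [numDigits]; simp [hn]
      have := ih (m / 10) (Nat.div_lt_self (by omega) (by omega)) (Nat.div_le_div_right h)
      omega

lemma allEvenNat_small (n : Nat) (h : n < 10) : allEvenNat n = (n % 2 == 0) := by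
  rw [allEvenNat]; simp [h]

lemma allEvenNat_step (n : Nat) (h : 10 ≤ n) :
    allEvenNat n = ((n % 2 == 0) && allEvenNat (n / 10)) := by
  rw [allEvenNat]; simp [Nat.not_lt.2 h]

lemma allEvenNat_even (n : Nat) (he : allEvenNat n = true) : n % 2 = 0 := by
  rw [allEvenNat] at he
  simp only [Bool.and_eq_true, beq_iff_eq] at he
  exact he.1

-- A's per-character test
def tc (c : Char) : Bool :=
  decide (PySem.Int.mod ((PySem.Int.ofStr? (String.ofList [c])).getD 0) 2 = 0)

lemma tc_digitChar (d : Nat) (h : d < 10) : tc (Nat.digitChar d) = decide (d % 2 = 0) := by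
  interval_cases d <;> decide

lemma toDigitsCore_eq (n : Nat) : ∀ (fuel : Nat) (ds : List Char), n < fuel →
    Nat.toDigitsCore 10 fuel n ds = Nat.toDigits 10 n ++ ds := by
  induction n using Nat.strong_induction_on with
  | _ n ih =>
    intro fuel ds hf
    match fuel with
    | fuel + 1 =>
      rw [Nat.toDigits]
      rw [Nat.toDigitsCore, Nat.toDigitsCore]
      by_cases h : n / 10 = 0
      · simp [h]
      · simp only [h, if_false]
        rw [ih (n / 10) (Nat.div_lt_self (by omega) (by omega)) fuel _ (by omega),
            ih (n / 10) (Nat.div_lt_self (by omega) (by omega)) n _ (by omega)]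
        simp

lemma toDigits_small (n : Nat) (h : n < 10) : Nat.toDigits 10 n = [Nat.digitChar n] := by
  rw [Nat.toDigits, Nat.toDigitsCore]
  simp [Nat.div_eq_of_lt h, Nat.mod_eq_of_lt h]

lemma toDigits_step (n : Nat) (h : 10 ≤ n) :
    Nat.toDigits 10 n = Nat.toDigits 10 (n / 10) ++ [Nat.digitChar (n % 10)] := by
  rw [Nat.toDigits, Nat.toDigitsCore]
  have h0 : ¬ n / 10 = 0 := by omega
  simp only [h0, if_false]
  exact toDigitsCore_eq (n / 10) n _ (by omega)

lemma all_tc_toDigits (n : Nat) : (Nat.toDigits 10 n).all tc = allEvenNat n := by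
  induction n using Nat.strong_induction_on with
  | _ n ih =>
    by_cases h : n < 10
    · rw [toDigits_small n h, allEvenNat]
      simp only [List.all_cons, List.all_nil, tc_digitChar n h, Bool.and_true]
      simp [h]
      cases h2 : n % 2 == 0 <;> simp_all
    · rw [toDigits_step n (by omega), allEvenNat]
      simp only [List.all_append, List.all_cons, List.all_nil,
        ih (n / 10) (Nat.div_lt_self (by omega) (by omega)), dif_neg h,
        tc_digitChar (n % 10) (by omega), Bool.and_true]
      have : n % 10 % 2 = n % 2 := Nat.mod_mod_of_dvd n (by norm_num)
      rw [this]
      cases hb : allEvenNat (n / 10) <;> cases hc : (n % 2 == 0) <;> simp_all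

lemma length_toDigits (n : Nat) : (Nat.toDigits 10 n).length = numDigits n := by
  induction n using Nat.strong_induction_on with
  | _ n ih =>
    by_cases h : n < 10
    · rw [toDigits_small n h, numDigits]; simp [h]
    · rw [toDigits_step n (by omega), numDigits]
      simp [h, ih (n / 10) (Nat.div_lt_self (by omega) (by omega))]

-- A is the range filtered by the even-digit test
lemma A_eq_filter (lo hb : Int) (hlo : 0 ≤ lo) :
    findEvenDigits lo hb = (PySem.List.pyRange lo (hb + 1) 1).filter allEvenInt := by
  unfold findEvenDigits
  rw [PySem.List.foldl_append_ite_eq_filter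
      (p := fun ct => ((PySem.Int.toStr ct).toList.foldl (fun flag digit =>
        if PySem.Int.mod ((PySem.Int.ofStr? (String.ofList [digit])).getD 0) 2 = 0
        then flag + 1 else flag) (0:Int)) ≥ ((PySem.Int.toStr ct).toList.length : Int))]
  rw [List.nil_append]
  apply List.filter_congr
  intro ct hct
  have hct0 : 0 ≤ ct := le_trans hlo (PySem.List.mem_pyRange_one.mp hct).1
  have hl : (PySem.Int.toStr ct).toList = Nat.toDigits 10 ct.toNat := by
    rw [PySem.Int.toList_toStr, PySem.Int.toChars, if_neg (by omega)]
  have hfun : (fun (flag : Int) digit =>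
      if PySem.Int.mod ((PySem.Int.ofStr? (String.ofList [digit])).getD 0) 2 = 0
      then flag + 1 else flag) = (fun (flag : Int) digit =>
      if tc digit = true then flag + 1 else flag) := by
    funext a c; simp [tc]
  rw [hfun, PySem.List.foldl_count_if, hl]
  set l := Nat.toDigits 10 ct.toNat with hldef
  have h1 : ((0:Int) + (l.countP tc : Int) ≥ (l.length : Int)) ↔ (∀ a ∈ l, tc a = true) := by
    rw [← List.countP_eq_length]
    have := List.countP_le_length (p := tc) (l := l)
    omega
  have h2 : allEvenInt ct = l.all tc := by
    rw [allEvenInt, ← all_tc_toDigits]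
  rw [h2]
  by_cases hc : ∀ a ∈ l, tc a = true
  · rw [List.all_eq_true.mpr hc, decide_eq_true_eq]
    exact h1.mpr hc
  · have hng : ¬ ((0:Int) + (l.countP tc : Int) ≥ (l.length : Int)) := fun h => hc (h1.mp h)
    rw [decide_eq_false hng]
    symm
    rw [← Bool.not_eq_true, List.all_eq_true]
    exact hc

-- level sequence of B
def L (hb : Int) : Nat → List Int
  | 0 => [2, 4, 6, 8]
  | i + 1 => fedNext hb (L hb i)

lemma fold_unroll (lo hb : Int) (k : Nat) (res : List Int) :
    (List.range k).foldl (fun (st : List Int × List Int) _ =>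
      (st.1 ++ st.2.filter (fun n => decide (lo ≤ n ∧ n ≤ hb)), fedNext hb st.2))
      (res, L hb 0) =
    (res ++ ((List.range k).map
        (fun i => (L hb i).filter (fun n => decide (lo ≤ n ∧ n ≤ hb)))).flatten,
     L hb k) := by
  induction k with
  | zero => simp
  | succ k ih =>
    rw [List.range_succ, List.foldl_append, ih]
    simp [List.foldl, L]

lemma B_eq_levels (lo hb : Int) :
    findEvenDigits_alt lo hb =
      (if lo ≤ 0 ∧ 0 ≤ hb then [0] else []) ++
        ((List.range (if 0 < hb then (PySem.Int.toStr hb).toList.length else 0)).map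
          (fun i => (L hb i).filter (fun n => decide (lo ≤ n ∧ n ≤ hb)))).flatten := by
  unfold findEvenDigits_alt
  show ((List.range (if 0 < hb then (PySem.Int.toStr hb).toList.length else 0)).foldl
      (fun (st : List Int × List Int) _ =>
        (st.1 ++ st.2.filter (fun n => decide (lo ≤ n ∧ n ≤ hb)), fedNext hb st.2))
      ((if lo ≤ 0 ∧ 0 ≤ hb then [0] else []), L hb 0)).1 = _
  rw [fold_unroll]

lemma L_sound (hb : Int) (i : Nat) :
    ∀ n ∈ L hb i, (2 * 10 ^ i ≤ n ∧ n < 10 ^ (i + 1)) := by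
  induction i with
  | zero => intro n hn; fin_cases hn <;> norm_num
  | succ i ih =>
    intro n hn
    rw [L, fedNext, List.mem_flatMap] at hn
    obtain ⟨m, hm, hn⟩ := hn
    obtain ⟨h1, h2⟩ := ih m hm
    by_cases hp : 10 * m ≤ hb
    · rw [if_pos hp] at hn
      simp only [List.mem_cons, List.not_mem_nil, or_false] at hn
      have : 10 * m ≤ n ∧ n ≤ 10 * m + 8 := by rcases hn with h|h|h|h|h <;> omega
      constructor
      · have : 2 * 10 ^ (i + 1) = 10 * (2 * 10 ^ i) := by ring
        omega
      · have h3 : 10 * m + 8 < 10 ^ (i + 1 + 1) := by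
          have : 10 ^ (i + 1 + 1) = 10 * 10 ^ (i + 1) := by ring
          omega
        omega
    · rw [if_neg hp] at hn; simp at hn

lemma L_even (hb : Int) (i : Nat) : ∀ n ∈ L hb i, allEvenInt n = true := by
  induction i with
  | zero =>
    intro n hn
    fin_cases hn <;> simp [allEvenInt, allEvenNat_small]
  | succ i ih =>
    intro n hn
    rw [L, fedNext, List.mem_flatMap] at hn
    obtain ⟨m, hm, hn⟩ := hn
    by_cases hp : 10 * m ≤ hb
    · rw [if_pos hp] at hn
      simp only [List.mem_cons, List.not_mem_nil, or_false] at hn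
      have hmb := L_sound hb i m hm
      have hm2 : (2:Int) ≤ m := by
        have : (1:Int) ≤ 10 ^ i := one_le_pow₀ (by norm_num)
        omega
      obtain ⟨d, hd, hrep⟩ : ∃ d : Nat, (d = 0 ∨ d = 2 ∨ d = 4 ∨ d = 6 ∨ d = 8) ∧ n = 10 * m + d := by
        rcases hn with h|h|h|h|h
        exacts [⟨0, by omega, by omega⟩, ⟨2, by omega, by omega⟩, ⟨4, by omega, by omega⟩,
                ⟨6, by omega, by omega⟩, ⟨8, by omega, by omega⟩]
      have hnn : n.toNat = 10 * m.toNat + d := by omega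
      rw [allEvenInt, hnn, allEvenNat_step _ (by omega)]
      have h10 : (10 * m.toNat + d) / 10 = m.toNat := by omega
      have h2 : (10 * m.toNat + d) % 2 = 0 := by omega
      rw [h10, h2]
      have := ih m hm
      rw [allEvenInt] at this
      simp [this]
    · rw [if_neg hp] at hn; simp at hn

lemma mem_fedItem {hb a x : Int}
    (hx : x ∈ (if 10 * a ≤ hb then [10 * a, 10 * a + 2, 10 * a + 4, 10 * a + 6, 10 * a + 8] else ([] : List Int))) :
    10 * a ≤ x ∧ x ≤ 10 * a + 8 := by
  split at hx
  · simp only [List.mem_cons, List.not_mem_nil, or_false] at hx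
    rcases hx with h|h|h|h|h <;> omega
  · simp at hx

lemma L_pairwise (hb : Int) (i : Nat) : (L hb i).Pairwise (· < ·) := by
  induction i with
  | zero => rw [L]; decide
  | succ i ih =>
    rw [L, fedNext, List.flatMap_def, List.pairwise_flatten]
    constructor
    · intro l hl
      rw [List.mem_map] at hl
      obtain ⟨a, _, rfl⟩ := hl
      split
      · have hp : List.Pairwise (· < ·) ([0, 2, 4, 6, 8] : List Int) := by decide
        have hm : List.Pairwise (· < ·) (([0, 2, 4, 6, 8] : List Int).map (fun d => 10 * a + d)) := by
          rw [List.pairwise_map]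
          exact hp.imp (fun h => by omega)
        simp only [List.map_cons, List.map_nil] at hm
        simp only [add_zero] at hm
        exact hm
      · exact List.Pairwise.nil
    · rw [List.pairwise_map]
      refine ih.imp ?_
      intro a b hab x hx y hy
      have h1 := mem_fedItem hx
      have h2 := mem_fedItem hy
      omega

lemma L_complete (hb : Int) (N : Nat) (h2 : 2 ≤ N) (hhb : (N : Int) ≤ hb)
    (he : allEvenNat N = true) : (N : Int) ∈ L hb (numDigits N - 1) := by
  induction N using Nat.strong_induction_on with
  | _ N ih =>
    by_cases hN : N < 10
    · have hnd : numDigits N = 1 := by rw [numDigits]; simp [hN]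
      have hpar : N % 2 = 0 := allEvenNat_even N he
      rw [hnd]
      interval_cases N <;> simp_all <;> rw [L] <;> decide
    · have hM2 : allEvenNat (N / 10) = true := by
        rw [allEvenNat] at he
        simp only [Bool.and_eq_true] at he
        have := he.2
        rw [dif_neg hN] at this
        exact this
      have hMpar : N / 10 % 2 = 0 := allEvenNat_even _ hM2
      have hMge : 2 ≤ N / 10 := by omega
      have hMhb : ((N / 10 : Nat) : Int) ≤ hb := by
        have : N / 10 ≤ N := Nat.div_le_self _ _
        omega
      have hIH := ih (N / 10) (Nat.div_lt_self (by omega) (by omega)) hMge hMhb hM2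
      have hnd : numDigits N - 1 = (numDigits (N / 10) - 1) + 1 := by
        rw [numDigits]
        have h1 := numDigits_pos (N / 10)
        simp [hN]
        omega
      rw [hnd, L, fedNext, List.mem_flatMap]
      refine ⟨((N / 10 : Nat) : Int), hIH, ?_⟩
      have hple : 10 * ((N / 10 : Nat) : Int) ≤ hb := by omega
      rw [if_pos hple]
      have hd : N % 10 % 2 = 0 := by
        have := allEvenNat_even N he
        omega
      simp only [List.mem_cons, List.not_mem_nil, or_false]
      omega

lemma allEvenInt_zero : allEvenInt 0 = true := by
  rw [allEvenInt, Int.toNat_zero, allEvenNat_small 0 (by norm_num)]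
  decide

lemma main_eq (lo hb : Int) (hlo : 0 ≤ lo) :
    findEvenDigits lo hb = findEvenDigits_alt lo hb := by
  rw [A_eq_filter lo hb hlo, B_eq_levels lo hb]
  by_cases hpos : 0 < hb
  case neg =>
    -- degenerate high bound: no levels are scanned
    rw [if_neg hpos]
    simp only [List.range_zero, List.map_nil, List.flatten_nil, List.append_nil]
    by_cases hz : hb = 0
    · subst hz
      by_cases hl0 : lo = 0
      · subst hl0
        rw [if_pos (by norm_num)]
        rw [show (0 + 1 : Int) = 1 from rfl]
        rw [show PySem.List.pyRange 0 1 1 = [0] from by decide]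
        simp [List.filter, allEvenInt_zero]
      · rw [if_neg (by omega), PySem.List.pyRange_one_eq_nil (by omega), List.filter_nil]
    · rw [if_neg (by omega), PySem.List.pyRange_one_eq_nil (by omega), List.filter_nil]
  case pos =>
  rw [if_pos hpos]
  set k := (PySem.Int.toStr hb).toList.length with hk
  have hkval : k = numDigits hb.toNat := by
    rw [hk, PySem.Int.toList_toStr, PySem.Int.toChars, if_neg (by omega), length_toDigits]
  -- both sides are strictly increasing with the same members
  set lhs := (PySem.List.pyRange lo (hb + 1) 1).filter allEvenInt with hlhs
  set rhs := (if lo ≤ 0 ∧ 0 ≤ hb then [0] else []) ++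
      ((List.range k).map
        (fun i => (L hb i).filter (fun n => decide (lo ≤ n ∧ n ≤ hb)))).flatten with hrhs
  have plhs : lhs.Pairwise (· < ·) :=
    (PySem.List.pairwise_lt_pyRange_one lo (hb + 1)).filter _
  have prhs : rhs.Pairwise (· < ·) := by
    rw [hrhs, ← List.flatten_cons, List.pairwise_flatten]
    constructor
    · intro l hl
      rcases List.mem_cons.mp hl with rfl | hl
      · split
        · exact List.pairwise_singleton _ _
        · exact List.Pairwise.nil
      · rw [List.mem_map] at hl
        obtain ⟨i, _, rfl⟩ := hl
        exact (L_pairwise hb i).filter _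
    · rw [List.pairwise_cons]
      constructor
      · intro l hl x hx y hy
        rw [List.mem_map] at hl
        obtain ⟨i, _, rfl⟩ := hl
        have hy' := (L_sound hb i y (List.mem_filter.mp hy).1).1
        have h1 : (1:Int) ≤ 10 ^ i := one_le_pow₀ (by norm_num)
        have hx0 : x = 0 := by
          split at hx
          · simpa using hx
          · simp at hx
        omega
      · rw [List.pairwise_map]
        refine List.pairwise_lt_range.imp ?_
        intro i j hij x hx y hy
        have hxb := (L_sound hb i x (List.mem_filter.mp hx).1).2
        have hyb := (L_sound hb j y (List.mem_filter.mp hy).1).1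
        have hpow : (10:Int) ^ (i + 1) ≤ 10 ^ j := pow_le_pow_right₀ (by norm_num) (by omega)
        have h1 : (0:Int) ≤ 10 ^ j := by positivity
        omega
  refine List.Perm.eq_of_pairwise (le := (· < ·))
    (fun a b _ _ h1 h2 => absurd h1 (lt_asymm h2)) plhs prhs ?_
  rw [List.perm_ext_iff_of_nodup (plhs.imp ne_of_lt) (prhs.imp ne_of_lt)]
  intro a
  rw [hlhs, hrhs, List.mem_filter, PySem.List.mem_pyRange_one, List.mem_append,
      List.mem_flatten]
  constructor
  · rintro ⟨⟨hal, hah⟩, hae⟩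
    have ha0 : 0 ≤ a := le_trans hlo hal
    by_cases haz : a = 0
    · subst haz
      left
      rw [if_pos ⟨hal, by omega⟩]
      simp
    · right
      have hatoNat2 : 2 ≤ a.toNat := by
        have hev := allEvenNat_even a.toNat hae
        omega
      have hmem := L_complete hb a.toNat hatoNat2 (by omega) hae
      refine ⟨(L hb (numDigits a.toNat - 1)).filter (fun n => decide (lo ≤ n ∧ n ≤ hb)),
        ?_, ?_⟩
      · rw [List.mem_map]
        refine ⟨numDigits a.toNat - 1, List.mem_range.mpr ?_, rfl⟩
        rw [hkval]
        have hmono := numDigits_mono (show a.toNat ≤ hb.toNat by omega)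
        have := numDigits_pos a.toNat
        omega
      · rw [List.mem_filter]
        rw [Int.toNat_of_nonneg ha0] at hmem
        exact ⟨hmem, by simp; omega⟩
  · rintro (ha | ⟨l, hl, hal⟩)
    · split at ha
      · next hc =>
        simp only [List.mem_cons, List.not_mem_nil, or_false] at ha
        subst ha
        refine ⟨⟨hc.1, by omega⟩, allEvenInt_zero⟩
      · simp at ha
    · rw [List.mem_map] at hl
      obtain ⟨i, _, rfl⟩ := hl
      rw [List.mem_filter] at hal
      have hae := L_even hb i a hal.1
      have hrange := hal.2
      simp only [decide_eq_true_eq] at hrange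
      exact ⟨⟨hrange.1, by omega⟩, hae⟩

-- ===== VERDICT (by name: the statement is the Claim_ definition above) =====
theorem findEvenDigits_spec : Claim_equal_findEvenDigits := by
  intro lo hb _ hpre
  unfold Spec_findEvenDigits
  by_cases hlo : 0 ≤ lo
  · exact main_eq lo hb hlo
  · -- then highBound < lowBound < 0: both sides are []
    have hlt : hb < lo := by
      rcases hpre with h | h
      · exact absurd h hlo
      · exact h
    unfold findEvenDigits findEvenDigits_alt
    rw [PySem.List.pyRange_one_eq_nil (by omega)]
    rw [if_neg (by omega), if_neg (by omega)]
    simp
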